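-- pv_equiv track=rewrite | github.com/heyan0118-spec/patchnote-prasia | src/patchnote_prasia/events.py | _extract_block
-- ===== SOURCE A (Python) =====
-- def _extract_block(text: str, label: str, stop_labels: tuple[str, ...]) -> str | None:
--     idx = text.find(label)
--     if idx < 0:
--         return None
--     start = idx + len(label)
--     tail = text[start:]
--     stop_positions = [tail.find(stop) for stop in stop_labels if tail.find(stop) >= 0]
--     end = min(stop_positions) if stop_positions else len(tail)
--     value = tail[:end].strip(" :-")
--     return value or None
-- ===== SOURCE B (Python) =====
-- def _extract_block(text, label, stop_labels):
--     idx = text.find(label)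
--     if idx < 0:
--         return None
--     tail = text[idx + len(label):]
--     end = len(tail)
--     for i in range(len(tail)):
--         if any(tail[i:].startswith(stop) for stop in stop_labels):
--             end = i
--             break
--     value = tail[:end].strip(" :-")
--     return value or None
-- ===== Notes on version B (the rewrite author's own statement) =====
-- stated objective: alternative
-- what changed: Replaces the per-stop-label find + min over collected positions with a single left-to-right scan of the tail that stops at the first position where any stop label starts.
import Mathlib
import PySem

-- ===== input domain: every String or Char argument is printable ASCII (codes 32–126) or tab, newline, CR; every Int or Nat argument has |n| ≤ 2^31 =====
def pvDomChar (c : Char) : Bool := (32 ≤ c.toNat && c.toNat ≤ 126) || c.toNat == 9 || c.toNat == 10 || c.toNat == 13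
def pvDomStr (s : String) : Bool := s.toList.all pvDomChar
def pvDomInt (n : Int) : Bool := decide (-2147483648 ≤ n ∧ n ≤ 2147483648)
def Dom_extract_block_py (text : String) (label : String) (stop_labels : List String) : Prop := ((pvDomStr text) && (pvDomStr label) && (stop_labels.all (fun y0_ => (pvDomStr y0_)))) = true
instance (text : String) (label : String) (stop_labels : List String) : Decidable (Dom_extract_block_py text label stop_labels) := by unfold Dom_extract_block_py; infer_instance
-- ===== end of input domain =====

-- B replaces the list-of-finds-plus-min with a single left-to-right scan for the first
-- position where any stop label starts (alternative decomposition, same cost class).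

-- ===== PORT A =====
-- end = min(stop_positions) if stop_positions else len(tail)
def aEndPos (stop_labels : List String) (tail : String) : Int :=
  let positions := (stop_labels.filter (fun stop => decide (0 ≤ PySem.Str.find tail stop))).map
      (fun stop => PySem.Str.find tail stop)
  match PySem.List.min? positions (fun x => x) with
  | some m => m
  | none => (PySem.Str.len tail : Int)

def extract_block_py (text : String) (label : String) (stop_labels : List String) : Option String :=
  let idx := PySem.Str.find text label
  if idx < 0 then none
  else
    let tail := PySem.Str.slice text (some (idx + (PySem.Str.len label : Int))) none
    let value := PySem.Str.stripChars (PySem.Str.slice tail none (some (aEndPos stop_labels tail))) " :-"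
    if value = "" then none else some value

-- ===== PORT B =====
-- for i in range(len(tail)): if any(tail[i:].startswith(stop) for stop in stop_labels): end = i; break
def firstStopPos (stop_labels : List String) : List Char → Nat
  | [] => 0
  | c :: rest =>
    if stop_labels.any (fun stop => PySem.Chars.startswith (c :: rest) stop.toList) then 0
    else firstStopPos stop_labels rest + 1

def extract_block_py_alt (text : String) (label : String) (stop_labels : List String) : Option String :=
  let idx := PySem.Str.find text label
  if idx < 0 then none
  else
    let tail := PySem.Str.slice text (some (idx + (PySem.Str.len label : Int))) none
    let endN := firstStopPos stop_labels tail.toList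
    let value := PySem.Str.stripChars (PySem.Str.slice tail none (some (endN : Int))) " :-"
    if value = "" then none else some value

-- ===== PRECONDITION & SPEC =====
def Spec_extract_block_py (text : String) (label : String) (stop_labels : List String) (out : Option String) : Prop := out = extract_block_py_alt text label stop_labels
instance (text : String) (label : String) (stop_labels : List String) (out : Option String) : Decidable (Spec_extract_block_py text label stop_labels out) := by unfold Spec_extract_block_py; infer_instance

-- ===== CLAIM (what is proved, stated in full; the proofs are below) =====
def Claim_equal_extract_block_py : Prop := ∀ (text : String) (label : String) (stop_labels : List String), Dom_extract_block_py text label stop_labels → Spec_extract_block_py text label stop_labels (extract_block_py text label stop_labels)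

-- ===== LEMMAS AND PROOFS =====

-- firstStopPos is the least position (capped at length) where some stop label is a prefix.
theorem firstStopPos_eq (stop_labels : List String) (cs : List Char) (m : Nat)
    (h1 : m ≤ cs.length)
    (h2 : ∀ j < m, ¬ ∃ s ∈ stop_labels, s.toList <+: cs.drop j)
    (h3 : m = cs.length ∨ ∃ s ∈ stop_labels, s.toList <+: cs.drop m) :
    firstStopPos stop_labels cs = m := by
  induction cs generalizing m with
  | nil => simp only [firstStopPos]; simp at h1; omega
  | cons c rest ih =>
    by_cases h0 : ∃ s ∈ stop_labels, s.toList <+: (c :: rest)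
    · have hm : m = 0 := by
        by_contra hne
        exact h2 0 (Nat.pos_of_ne_zero hne) (by simpa using h0)
      subst hm
      simp only [firstStopPos]
      rw [if_pos]
      simp only [List.any_eq_true]
      obtain ⟨s, hs, hp⟩ := h0
      exact ⟨s, hs, (PySem.Chars.startswith_iff _ _).2 hp⟩
    · have hm : m ≠ 0 := by
        rintro rfl
        rcases h3 with h | h
        · simp at h
        · exact h0 (by simpa using h)
      obtain ⟨m', rfl⟩ := Nat.exists_eq_succ_of_ne_zero hm
      simp only [firstStopPos]
      rw [if_neg]
      · have := ih m' (by simpa using h1)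
          (fun j hj => by simpa using h2 (j + 1) (Nat.succ_lt_succ hj))
          (by rcases h3 with h | h
              · exact Or.inl (by simpa using h)
              · exact Or.inr (by simpa using h))
        omega
      · simp only [List.any_eq_true, not_exists, not_and]
        intro s hs hsw
        exact h0 ⟨s, hs, (PySem.Chars.startswith_iff _ _).1 hsw⟩

-- A's min-of-finds equals B's first-match scan, stated over the character list.
theorem aEnd_eq_chars (stop_labels : List String) (tcs : List Char) :
    (match PySem.List.min? ((stop_labels.filter (fun stop => decide (0 ≤ PySem.Chars.find tcs stop.toList))).map
        (fun stop => PySem.Chars.find tcs stop.toList)) (fun x => x) with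
      | some m => m
      | none => (tcs.length : Int)) = (firstStopPos stop_labels tcs : Int) := by
  cases hmin : PySem.List.min? ((stop_labels.filter (fun stop => decide (0 ≤ PySem.Chars.find tcs stop.toList))).map
      (fun stop => PySem.Chars.find tcs stop.toList)) (fun x => x) with
  | none =>
    have hempty := (PySem.List.min?_eq_none_iff _ _).1 hmin
    have hnone : ∀ s ∈ stop_labels, ¬ 0 ≤ PySem.Chars.find tcs s.toList := by
      intro s hs hge
      have hmem : PySem.Chars.find tcs s.toList ∈
          (stop_labels.filter (fun stop => decide (0 ≤ PySem.Chars.find tcs stop.toList))).map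
            (fun stop => PySem.Chars.find tcs stop.toList) :=
        List.mem_map_of_mem (List.mem_filter.2 ⟨hs, by simpa using hge⟩)
      rw [hempty] at hmem
      simp at hmem
    have hfs : firstStopPos stop_labels tcs = tcs.length := by
      apply firstStopPos_eq _ _ _ le_rfl _ (Or.inl rfl)
      rintro j hj ⟨s, hs, hp⟩
      exact hnone s hs ((PySem.Chars.find_nonneg_iff _ _).2
        ((PySem.Chars.isIn_iff_infix _ _).1 ((PySem.Chars.exists_prefix_drop_iff_isIn _ _).1 ⟨j, hp⟩)))
    simp [hfs]
  | some m =>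
    have hmem := PySem.List.min?_mem hmin
    obtain ⟨s0, hs0mem, hs0⟩ := List.mem_map.1 hmem
    have hs0f := List.mem_filter.1 hs0mem
    have hge : 0 ≤ PySem.Chars.find tcs s0.toList := by simpa using hs0f.2
    have hle := PySem.Chars.find_le_length tcs s0.toList
    have hres : firstStopPos stop_labels tcs = m.toNat := by
      apply firstStopPos_eq
      · omega
      · rintro j hj ⟨s, hs, hp⟩
        -- a stop-label prefix at j forces find ≤ j < m, contradicting minimality of m
        have hgesj : 0 ≤ PySem.Chars.find tcs s.toList :=
          (PySem.Chars.find_nonneg_iff _ _).2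
            ((PySem.Chars.isIn_iff_infix _ _).1 ((PySem.Chars.exists_prefix_drop_iff_isIn _ _).1 ⟨j, hp⟩))
        have hspec := PySem.Chars.find_spec hgesj
        have hfle : (PySem.Chars.find tcs s.toList).toNat ≤ j := by
          by_contra hlt
          exact hspec.2 j (by omega) hp
        have hmemp : PySem.Chars.find tcs s.toList ∈
            (stop_labels.filter (fun stop => decide (0 ≤ PySem.Chars.find tcs stop.toList))).map
              (fun stop => PySem.Chars.find tcs stop.toList) :=
          List.mem_map_of_mem (List.mem_filter.2 ⟨hs, by simpa using hgesj⟩)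
        have hmle := PySem.List.min?_isMin hmin _ hmemp
        simp only at hmle
        omega
      · have hspec := (PySem.Chars.find_spec hge).1
        rw [hs0] at hspec
        exact Or.inr ⟨s0, hs0f.1, hspec⟩
    rw [hres]
    show m = (m.toNat : Int)
    omega

theorem aEnd_eq_firstStop (stop_labels : List String) (tail : String) :
    aEndPos stop_labels tail = (firstStopPos stop_labels tail.toList : Int) := by
  unfold aEndPos
  simp only [PySem.Str.find_eq, PySem.Str.len_eq]
  exact aEnd_eq_chars stop_labels tail.toList

-- ===== VERDICT (by name: the statement is the Claim_ definition above) =====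
theorem extract_block_py_spec : Claim_equal_extract_block_py := by
  intro text label stop_labels _
  unfold Spec_extract_block_py
  simp only [extract_block_py, extract_block_py_alt]
  rw [aEnd_eq_firstStop]
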